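-- pv_equiv track=rewrite | github.com/yarynaamryhlotska/python_project | generate_detailed_map.py | generate_detailed_map
-- ===== SOURCE A (Python) =====
-- def generate_detailed_map(ground_map, N):
--     detailed_map = []
--
--     for row in ground_map:
--         expanded_row = []
--         for cell in row:
--             expanded_cell = [cell] * N
--             expanded_row.extend(expanded_cell)
--         for _ in range(N):
--             detailed_map.append(expanded_row.copy())
--
--     return detailed_map
-- ===== SOURCE B (Python) =====
-- def generate_detailed_map(ground_map, N):
--     result = []
--     for i in range(len(ground_map) * N):
--         src = ground_map[i // N]
--         result.append([src[j // N] for j in range(len(src) * N)])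
--     return result
-- ===== Notes on version B (the rewrite author's own statement) =====
-- stated objective: alternative
-- what changed: Replaces A's replicate-and-copy construction (extend each row cell-by-cell with [cell]*N, then append N copies of the row) by direct coordinate mapping: each output row i is built as [ground_map[i//N][j//N] for j in range(len(src)*N)].
import Mathlib
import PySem

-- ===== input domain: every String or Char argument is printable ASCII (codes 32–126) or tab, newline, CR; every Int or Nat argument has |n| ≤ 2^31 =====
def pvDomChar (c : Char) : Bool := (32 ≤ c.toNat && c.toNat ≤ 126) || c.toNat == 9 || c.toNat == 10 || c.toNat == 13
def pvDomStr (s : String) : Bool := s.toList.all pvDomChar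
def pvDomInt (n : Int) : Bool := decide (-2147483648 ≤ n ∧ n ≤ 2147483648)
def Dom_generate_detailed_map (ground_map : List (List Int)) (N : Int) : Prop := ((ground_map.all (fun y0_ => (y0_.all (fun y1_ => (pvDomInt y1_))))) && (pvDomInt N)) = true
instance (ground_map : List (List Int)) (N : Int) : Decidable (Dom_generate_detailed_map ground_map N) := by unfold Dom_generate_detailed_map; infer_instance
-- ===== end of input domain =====

-- B replaces A's replicate-and-copy construction by direct coordinate mapping
-- (output[i][j] = input[i//N][j//N]); objective: alternative decomposition, same cost.

-- ===== PORT A =====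
-- literal transliteration of A: build each expanded row by extending with [cell]*N,
-- then append N copies of it (loop over range(N)).
def generate_detailed_map (ground_map : List (List Int)) (N : Int) : List (List Int) :=
  ground_map.foldl (fun detailed_map row =>
    let expanded_row :=
      row.foldl (fun er cell => er ++ PySem.List.pyRepeat [cell] N) []
    (PySem.List.pyRange 0 N 1).foldl (fun dm _ => dm ++ [expanded_row]) detailed_map) []

-- ===== PORT B =====
-- literal transliteration of Source B: map output indices; ground_map[i//N] / src[j//N]
-- are in range whenever the ranges are non-empty, ported with the total pyGetD.
def generate_detailed_map_alt (ground_map : List (List Int)) (N : Int) : List (List Int) :=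
  (PySem.List.pyRange 0 ((ground_map.length : Int) * N) 1).map (fun i =>
    let src := PySem.List.pyGetD ground_map (PySem.Int.floordiv i N) []
    (PySem.List.pyRange 0 ((src.length : Int) * N) 1).map (fun j =>
      PySem.List.pyGetD src (PySem.Int.floordiv j N) 0))

-- ===== PRECONDITION & SPEC =====
def Spec_generate_detailed_map (ground_map : List (List Int)) (N : Int) (out : List (List Int)) : Prop := out = generate_detailed_map_alt ground_map N
instance (ground_map : List (List Int)) (N : Int) (out : List (List Int)) : Decidable (Spec_generate_detailed_map ground_map N out) := by unfold Spec_generate_detailed_map; infer_instance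

-- ===== CLAIM (what is proved, stated in full; the proofs are below) =====
def Claim_equal_generate_detailed_map : Prop := ∀ (ground_map : List (List Int)) (N : Int), Dom_generate_detailed_map ground_map N → Spec_generate_detailed_map ground_map N (generate_detailed_map ground_map N)

-- ===== LEMMAS AND PROOFS =====

-- appending a constant element once per loop iteration = appending replicate
theorem foldl_append_const {α β : Type} (l : List α) (e : β) (acc : List β) :
    l.foldl (fun dm _ => dm ++ [e]) acc = acc ++ List.replicate l.length e := by
  induction l generalizing acc with
  | nil => simp
  | cons x t ih =>
    rw [List.foldl_cons, ih, List.length_cons, List.replicate_succ, List.append_assoc,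
      List.singleton_append]

-- coordinate mapping over a flattened range = flatMap of replicates
theorem range_mul_map_div {α β : Type} (n : Nat) (hn : 0 < n) (l : List α) (d : α) (h : α → β) :
    (List.range (l.length * n)).map (fun i => h (l.getD (i / n) d))
      = l.flatMap (fun x => List.replicate n (h x)) := by
  induction l with
  | nil => simp
  | cons x t ih =>
    have hlen : (x :: t).length * n = n + t.length * n := by
      simp [List.length_cons]; ring
    rw [hlen, List.range_add, List.map_append, List.flatMap_cons]
    congr 1
    · rw [List.eq_replicate_iff]
      refine ⟨by simp, ?_⟩
      intro b hb
      obtain ⟨i, hi, rfl⟩ := List.mem_map.mp hb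
      have hi' : i < n := List.mem_range.mp hi
      simp [Nat.div_eq_of_lt hi']
    · rw [List.map_map, ← ih]
      apply List.map_congr_left
      intro i _
      have hdiv : (n + i) / n = i / n + 1 := by
        rw [Nat.add_comm, Nat.add_div_right _ hn]
      simp [hdiv]

-- A's expanded row is the flatMap of replicates
theorem expand_row_eq (row : List Int) (N : Int) :
    row.foldl (fun er cell => er ++ PySem.List.pyRepeat [cell] N) []
      = row.flatMap (fun c => List.replicate N.toNat c) := by
  have := PySem.List.foldl_append_eq_flatMap (fun c : Int => List.replicate N.toNat c) row []
  simp only [PySem.List.pyRepeat_singleton]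
  exact this

theorem generate_detailed_map_spec : Claim_equal_generate_detailed_map := by
  intro gm N _
  unfold Spec_generate_detailed_map generate_detailed_map generate_detailed_map_alt
  by_cases hN : N ≤ 0
  · -- both sides empty: every loop range is empty
    have h1 : PySem.List.pyRange 0 N 1 = [] := PySem.List.pyRange_one_eq_nil hN
    have h2 : PySem.List.pyRange 0 ((gm.length : Int) * N) 1 = [] :=
      PySem.List.pyRange_one_eq_nil (by nlinarith [Int.natCast_nonneg gm.length])
    rw [h1, h2]
    simp only [List.foldl_nil, List.map_nil]
    induction gm with
    | nil => simp
    | cons r t ih => simpa using ih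
  · have hN' : 0 < N := by omega
    obtain ⟨n, rfl⟩ : ∃ n : Nat, N = (n : Int) := ⟨N.toNat, (Int.toNat_of_nonneg hN'.le).symm⟩
    have hnpos : 0 < n := by exact_mod_cast hN'
    -- the common normal form both sides are reduced to
    have hB : ∀ (k : Nat),
        ((fun i => (PySem.List.pyRange 0 ((((PySem.List.pyGetD gm (PySem.Int.floordiv i (n:Int)) []).length : Int)) * (n:Int)) 1).map (fun j =>
            PySem.List.pyGetD (PySem.List.pyGetD gm (PySem.Int.floordiv i (n:Int)) []) (PySem.Int.floordiv j (n:Int)) 0)) ∘ (fun k : Nat => (k : Int))) k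
          = (fun row => (List.range (row.length * n)).map (fun j => row.getD (j / n) 0)) (gm.getD (k / n) []) := by
      intro k
      simp only [Function.comp_apply, PySem.Int.floordiv_natCast, PySem.List.pyGetD_natCast]
      set row := gm.getD (k / n) [] with hrow
      have hc : ((row.length : Int) * (n : Int)) = ((row.length * n : Nat) : Int) := by push_cast; ring
      rw [hc, PySem.List.pyRange_zero_natCast, List.map_map]
      apply List.map_congr_left
      intro j _
      show PySem.List.pyGetD row (PySem.Int.floordiv (j : Int) (n : Int)) 0 = row.getD (j / n) 0
      rw [PySem.Int.floordiv_natCast j n, PySem.List.pyGetD_natCast]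
    have hBeq :
        (PySem.List.pyRange 0 ((gm.length : Int) * (n:Int)) 1).map (fun i =>
          (PySem.List.pyRange 0 ((((PySem.List.pyGetD gm (PySem.Int.floordiv i (n:Int)) []).length : Int)) * (n:Int)) 1).map (fun j =>
            PySem.List.pyGetD (PySem.List.pyGetD gm (PySem.Int.floordiv i (n:Int)) []) (PySem.Int.floordiv j (n:Int)) 0))
          = gm.flatMap (fun row => List.replicate n ((List.range (row.length * n)).map (fun j => row.getD (j / n) 0))) := by
      have hBcast : ((gm.length : Int) * (n : Int)) = ((gm.length * n : Nat) : Int) := by push_cast; ring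
      rw [hBcast, PySem.List.pyRange_zero_natCast, List.map_map]
      rw [List.map_congr_left (fun k _ => hB k)]
      exact range_mul_map_div n hnpos gm [] (fun row => (List.range (row.length * n)).map (fun j => row.getD (j / n) 0))
    -- A side: one row's contribution
    have hA : ∀ (row : List Int) (acc : List (List Int)),
        (PySem.List.pyRange 0 (n:Int) 1).foldl
            (fun dm _ => dm ++ [row.foldl (fun er cell => er ++ PySem.List.pyRepeat [cell] (n:Int)) []]) acc
          = acc ++ List.replicate n ((List.range (row.length * n)).map (fun j => row.getD (j / n) 0)) := by
      intro row acc
      rw [foldl_append_const, expand_row_eq]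
      have hlen : (PySem.List.pyRange 0 (n:Int) 1).length = n := by
        rw [PySem.List.pyRange_zero_natCast]; simp
      have hr : (List.range (row.length * n)).map (fun j => row.getD (j / n) 0)
          = row.flatMap (fun c => List.replicate n c) := by
        simpa using range_mul_map_div n hnpos row 0 (fun x => x)
      rw [hlen]
      simp [Int.toNat_natCast, ← hr]
    have hAeq : ∀ (g : List (List Int)) (acc : List (List Int)),
        g.foldl (fun detailed_map row =>
            (PySem.List.pyRange 0 (n:Int) 1).foldl
              (fun dm _ => dm ++ [row.foldl (fun er cell => er ++ PySem.List.pyRepeat [cell] (n:Int)) []]) detailed_map) acc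
          = acc ++ g.flatMap (fun row => List.replicate n ((List.range (row.length * n)).map (fun j => row.getD (j / n) 0))) := by
      intro g
      induction g with
      | nil => intro acc; simp
      | cons r t ih =>
        intro acc
        rw [List.foldl_cons, hA r acc, ih]
        simp [List.flatMap_cons]
    show (gm.foldl (fun detailed_map row =>
            (PySem.List.pyRange 0 (n:Int) 1).foldl
              (fun dm _ => dm ++ [row.foldl (fun er cell => er ++ PySem.List.pyRepeat [cell] (n:Int)) []]) detailed_map) []) =
         (PySem.List.pyRange 0 ((gm.length : Int) * (n:Int)) 1).map (fun i =>
          (PySem.List.pyRange 0 ((((PySem.List.pyGetD gm (PySem.Int.floordiv i (n:Int)) []).length : Int)) * (n:Int)) 1).map (fun j =>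
            PySem.List.pyGetD (PySem.List.pyGetD gm (PySem.Int.floordiv i (n:Int)) []) (PySem.Int.floordiv j (n:Int)) 0))
    rw [hAeq gm [], hBeq, List.nil_append]
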